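-- pv_equiv track=rewrite | github.com/mech-1/PythonModule2_090425 | Lesson18/home_work/10_task_sort.py | sum_heaps_v2
-- ===== SOURCE A (Python) =====
-- def sum_heaps_v2(stones: list) -> tuple:
--     swapped = True
--     heap1 = []
--     heap2 = []
--     for i, stone in enumerate(sorted(stones), 1):
--         if swapped:
--             heap1.append(stone)
--         else:
--             heap2.append(stone)
--         swapped = not swapped
--
--     return sum(heap1), sum(heap2)
-- ===== SOURCE B (Python) =====
-- def sum_heaps_v2(stones: list) -> tuple:
--     s = sorted(stones)
--     h1 = sum(s[::2])
--     return h1, sum(stones) - h1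
-- ===== Notes on version B (the rewrite author's own statement) =====
-- stated objective: simpler
-- what changed: B never distributes elements: it sums only the even-index stride s[::2] of the sorted list and derives the second heap as sum(stones) - h1 from the unsorted total, removing the toggle flag, the per-element branch and both heap lists.
import Mathlib
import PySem

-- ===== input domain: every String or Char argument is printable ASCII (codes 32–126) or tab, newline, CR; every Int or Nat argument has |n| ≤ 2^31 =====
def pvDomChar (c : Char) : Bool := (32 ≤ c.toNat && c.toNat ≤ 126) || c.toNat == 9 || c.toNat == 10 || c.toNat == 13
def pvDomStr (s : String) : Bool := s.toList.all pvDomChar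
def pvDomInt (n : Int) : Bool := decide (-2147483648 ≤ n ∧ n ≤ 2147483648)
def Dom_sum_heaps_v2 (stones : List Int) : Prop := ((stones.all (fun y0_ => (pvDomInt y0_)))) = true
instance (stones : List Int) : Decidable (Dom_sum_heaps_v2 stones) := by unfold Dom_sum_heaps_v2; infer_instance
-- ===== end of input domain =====

-- B removes A's toggle flag and both heap lists: it sums the even-index stride s[::2]
-- of the sorted list and derives the second heap as sum(stones) - h1 (simpler decomposition).


-- ===== PORT A =====
-- one loop step: state (swapped, heap1, heap2) and the enumerated (i, stone)
def sumHeapsStepA (st : Bool × List Int × List Int) (p : Int × Int) : Bool × List Int × List Int :=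
  let swapped := st.1
  let heap1 := st.2.1
  let heap2 := st.2.2
  let stone := p.2
  if swapped then (!swapped, heap1 ++ [stone], heap2)
  else (!swapped, heap1, heap2 ++ [stone])

def sum_heaps_v2 (stones : List Int) : Int × Int :=
  let st := (PySem.List.enumerate (PySem.List.sorted stones (fun x => x) false) 1).foldl
              sumHeapsStepA (true, ([] : List Int), ([] : List Int))
  (st.2.1.sum, st.2.2.sum)

-- ===== PORT B =====
-- s[::2] → PySem.List.slice? s none none 2; step 2 ≠ 0, so the slice is always `some`
def sum_heaps_v2_alt (stones : List Int) : Int × Int :=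
  let s := PySem.List.sorted stones (fun x => x) false
  let h1 := ((PySem.List.slice? s none none 2).getD []).sum
  (h1, stones.sum - h1)

-- ===== PRECONDITION & SPEC =====
def Spec_sum_heaps_v2 (stones : List Int) (out : Int × Int) : Prop := out = sum_heaps_v2_alt stones
instance (stones : List Int) (out : Int × Int) : Decidable (Spec_sum_heaps_v2 stones out) := by unfold Spec_sum_heaps_v2; infer_instance

-- ===== CLAIM (what is proved, stated in full; the proofs are below) =====
def Claim_equal_sum_heaps_v2 : Prop := ∀ (stones : List Int), Dom_sum_heaps_v2 stones → Spec_sum_heaps_v2 stones (sum_heaps_v2 stones)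

-- ===== LEMMAS AND PROOFS =====

-- even-index and odd-index subsequences of a list
def pvEvens : List Int → List Int
  | [] => []
  | [a] => [a]
  | a :: _ :: t => a :: pvEvens t

def pvOdds (l : List Int) : List Int := pvEvens l.tail

theorem pvEvens_cons (b : Int) (t : List Int) : pvEvens (b :: t) = b :: pvOdds t := by
  cases t <;> rfl

-- s[::2] is exactly the even-index subsequence (getElem? form after unfolding slice?)
theorem filterMap_evens (xs : List Int) :
    List.filterMap (fun (k : ℕ) => xs[(2 * (k : ℤ)).toNat]?) (List.range ((xs.length + 1)/2)) = pvEvens xs := by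
  match xs with
  | [] => simp [pvEvens]
  | [a] => simp [pvEvens]
  | a :: b :: t =>
    have hm : ((a :: b :: t).length + 1)/2 = (t.length + 1)/2 + 1 := by
      simp only [List.length_cons]; omega
    rw [hm, List.range_succ_eq_map]
    rw [List.filterMap_cons, List.filterMap_map]
    have : ((fun (k : ℕ) => (a :: b :: t)[(2 * (k : ℤ)).toNat]?) ∘ Nat.succ)
        = fun (k : ℕ) => t[(2 * (k : ℤ)).toNat]? := by
      funext k
      have h : (2 * ((Nat.succ k : ℕ) : ℤ)).toNat = (2 * (k : ℤ)).toNat + 1 + 1 := by push_cast; omega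
      simp only [Function.comp_apply, h]
      simp
    rw [this, filterMap_evens t]
    cases t <;> simp [pvEvens]

theorem slice?_step_two (xs : List Int) :
    PySem.List.slice? xs none none 2 = some (pvEvens xs) := by
  simp only [PySem.List.slice?, PySem.List.sliceIndices]
  norm_num
  have hc : (if 0 < xs.length then (((xs.length:ℤ) + 2 - 1) / 2).toNat else 0) = (xs.length + 1)/2 := by
    split <;> omega
  rw [hc, filterMap_evens]

-- A's toggle loop collects exactly the even- and odd-index subsequences
theorem sumHeaps_loop (l : List Int) : ∀ (i : Int) (h1 h2 : List Int),
    (PySem.List.enumerate l i).foldl sumHeapsStepA (true, h1, h2)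
      = ((l.length % 2 == 0 : Bool), h1 ++ pvEvens l, h2 ++ pvOdds l) := by
  match l with
  | [] => intro i h1 h2; simp [PySem.List.enumerate_nil, pvEvens, pvOdds]
  | [a] =>
    intro i h1 h2
    simp [PySem.List.enumerate_cons, PySem.List.enumerate_nil, sumHeapsStepA, pvEvens, pvOdds]
  | a :: b :: t =>
    intro i h1 h2
    have ih := sumHeaps_loop t (i + 2) (h1 ++ [a]) (h2 ++ [b])
    simp only [PySem.List.enumerate_cons, List.foldl_cons, sumHeapsStepA,
      Bool.not_true, Bool.not_false, Bool.false_eq_true, if_true, if_false] at ih ⊢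
    rw [show i + 1 + 1 = i + 2 from by ring, ih]
    simp [pvEvens, pvEvens_cons, pvOdds]
    omega

-- the two parity sums add up to the total
theorem evens_add_odds_sum (l : List Int) : (pvEvens l).sum + (pvOdds l).sum = l.sum := by
  match l with
  | [] => simp [pvEvens, pvOdds]
  | [a] => simp [pvEvens, pvOdds]
  | a :: b :: t =>
    have := evens_add_odds_sum t
    simp only [pvEvens, pvOdds, List.tail_cons, pvEvens_cons, List.sum_cons] at *
    omega

-- ===== VERDICT (by name: the statement is the Claim_ definition above) =====
theorem sum_heaps_v2_spec : Claim_equal_sum_heaps_v2 := by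
  intro stones _
  unfold Spec_sum_heaps_v2 sum_heaps_v2 sum_heaps_v2_alt
  set s := PySem.List.sorted stones (fun x => x) false with hs
  have hperm : stones.sum = s.sum := ((PySem.List.sorted_perm stones (fun x => x) false).sum_eq).symm
  have hsum := evens_add_odds_sum s
  simp only [sumHeaps_loop, slice?_step_two, Option.getD_some, List.nil_append]
  exact Prod.ext rfl (by simp; omega)
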